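-- pv_equiv track=rewrite | github.com/fuzaylameen/STEREOTYPE-ANALYZER | cleaner.py | clean_script_lines
-- ===== SOURCE A (Python) =====
-- def clean_script_lines(lines):
--     dialogues = []
--     current_dialogue = []
--
--     for line in lines:
--         line = line.strip()
--         if not line:
--             continue
--
--         if line.isupper() and len(line.split()) <= 4:
--             if current_dialogue:
--                 dialogues.append(" ".join(current_dialogue).strip())
--                 current_dialogue = []
--         else:
--             current_dialogue.append(line)
--
--     if current_dialogue:
--         dialogues.append(" ".join(current_dialogue).strip())
--
--     return dialogues
-- ===== SOURCE B (Python) =====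
-- def clean_script_lines(lines):
--     def is_header(s):
--         return s.isupper() and len(s.split()) <= 4
--
--     stripped = [s for s in (l.strip() for l in lines) if s]
--     blocks = []
--     i, n = 0, len(stripped)
--     while i < n:
--         if is_header(stripped[i]):
--             i += 1
--         else:
--             j = i
--             while j < n and not is_header(stripped[j]):
--                 j += 1
--             blocks.append(" ".join(stripped[i:j]).strip())
--             i = j
--     return blocks
-- ===== Notes on version B (the rewrite author's own statement) =====
-- stated objective: alternative
-- what changed: Replaces A's accumulator-with-flush-on-header single pass by a classify-then-segment pipeline: first build the stripped non-empty stream, then cut it into maximal non-header runs with takeWhile/dropWhile-style scans and join each run.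
import Mathlib
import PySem

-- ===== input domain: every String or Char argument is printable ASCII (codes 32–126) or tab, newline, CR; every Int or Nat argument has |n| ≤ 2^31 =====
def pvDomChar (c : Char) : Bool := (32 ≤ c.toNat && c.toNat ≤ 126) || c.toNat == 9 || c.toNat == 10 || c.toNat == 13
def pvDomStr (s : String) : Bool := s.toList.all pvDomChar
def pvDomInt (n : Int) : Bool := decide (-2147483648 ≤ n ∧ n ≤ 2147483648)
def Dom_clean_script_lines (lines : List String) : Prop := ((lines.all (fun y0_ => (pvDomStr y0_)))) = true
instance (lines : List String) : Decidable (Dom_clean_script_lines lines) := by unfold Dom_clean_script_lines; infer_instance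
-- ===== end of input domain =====

-- B replaces A's accumulator-with-flush-on-header pass by a classify-then-segment pipeline
-- (strip/filter the stream first, then cut it into maximal non-header runs): an alternative
-- decomposition of the same cost, proved to return the identical list.


-- Shared helper: Python's `line.isupper() and len(line.split()) <= 4`.
-- str.isupper is ported by hand: on the ASCII domain the cased characters are exactly
-- A–Z and a–z, so isupper(s) = "some uppercase letter, and no lowercase letter" — exact on Dom.
def pvIsHeader (s : String) : Bool :=
  (s.toList.any PySem.Chars.isupper && s.toList.all (fun c => !PySem.Chars.islower c))
    && decide ((PySem.Str.split₀ s).length ≤ 4)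

-- ===== PORT A =====
-- the for-loop over `lines` with state (dialogues, current_dialogue), flush on header / at the end
def cleanGoA : List String → List String → List String → List String
  | [], dialogues, current =>
      if current ≠ [] then dialogues ++ [PySem.Str.strip (PySem.Str.join " " current)]
      else dialogues
  | l :: rest, dialogues, current =>
      let line := PySem.Str.strip l
      if line = "" then cleanGoA rest dialogues current
      else if pvIsHeader line then
        if current ≠ [] then
          cleanGoA rest (dialogues ++ [PySem.Str.strip (PySem.Str.join " " current)]) []
        else cleanGoA rest dialogues current
      else cleanGoA rest dialogues (current ++ [line])

def clean_script_lines (lines : List String) : List String := cleanGoA lines [] []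

-- ===== PORT B =====
-- `stripped = [s for s in (l.strip() for l in lines) if s]`
def pvStripped (lines : List String) : List String :=
  (lines.map PySem.Str.strip).filter (fun s => s ≠ "")

-- the outer while loop: skip a header, or collect the maximal non-header run (inner while)
def pvSegs : List String → List String
  | [] => []
  | s :: rest =>
      if pvIsHeader s then pvSegs rest
      else PySem.Str.strip (PySem.Str.join " " (s :: rest.takeWhile (fun t => !pvIsHeader t)))
            :: pvSegs (rest.dropWhile (fun t => !pvIsHeader t))
  termination_by l => l.length
  decreasing_by
  · simp
  · have := List.length_dropWhile_le (fun t => !pvIsHeader t) rest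
    simp; omega

def clean_script_lines_alt (lines : List String) : List String := pvSegs (pvStripped lines)

-- ===== PRECONDITION & SPEC =====
def Spec_clean_script_lines (lines : List String) (out : List String) : Prop := out = clean_script_lines_alt lines
instance (lines : List String) (out : List String) : Decidable (Spec_clean_script_lines lines out) := by unfold Spec_clean_script_lines; infer_instance

-- ===== CLAIM (what is proved, stated in full; the proofs are below) =====
def Claim_equal_clean_script_lines : Prop := ∀ (lines : List String), Dom_clean_script_lines lines → Spec_clean_script_lines lines (clean_script_lines lines)

-- ===== LEMMAS AND PROOFS =====

theorem pvSegs_header {s : String} (rest : List String) (h : pvIsHeader s = true) :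
    pvSegs (s :: rest) = pvSegs rest := by
  rw [pvSegs]; simp [h]

theorem pvSegs_cons {s : String} (rest : List String) (h : pvIsHeader s = false) :
    pvSegs (s :: rest) =
      PySem.Str.strip (PySem.Str.join " " (s :: rest.takeWhile (fun t => !pvIsHeader t)))
        :: pvSegs (rest.dropWhile (fun t => !pvIsHeader t)) := by
  rw [pvSegs]; simp [h]

theorem pvStripped_cons (l : String) (rest : List String) :
    pvStripped (l :: rest) =
      if PySem.Str.strip l = "" then pvStripped rest
      else PySem.Str.strip l :: pvStripped rest := by
  simp only [pvStripped, List.map_cons, List.filter_cons]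
  split_ifs with h <;> simp_all

-- main invariant: running A's loop from state (d, c) produces d, then the pending block c
-- merged with the next non-header run of the stripped stream, then B's segments of the rest
theorem cleanGoA_eq (lines : List String) : ∀ (d c : List String),
    cleanGoA lines d c =
      if c = [] then d ++ pvSegs (pvStripped lines)
      else d ++ (PySem.Str.strip (PySem.Str.join " "
              (c ++ (pvStripped lines).takeWhile (fun t => !pvIsHeader t)))
            :: pvSegs ((pvStripped lines).dropWhile (fun t => !pvIsHeader t))) := by
  induction lines with
  | nil =>
      intro d c
      simp only [pvStripped, List.map_nil, List.filter_nil, List.takeWhile_nil,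
        List.dropWhile_nil, List.append_nil, cleanGoA, pvSegs]
      split_ifs with h1 h2 <;> simp_all
  | cons l rest ih =>
      intro d c
      rw [pvStripped_cons]
      by_cases he : PySem.Str.strip l = ""
      · simp only [cleanGoA, he, if_pos rfl, if_true]
        simpa using ih d c
      · simp only [cleanGoA, he, if_neg he, if_false]
        by_cases hh : pvIsHeader (PySem.Str.strip l) = true
        · simp only [hh, if_true, if_neg he]
          by_cases hc : c = []
          · subst hc
            simp only [ne_eq, not_true_eq_false, if_false, if_pos rfl]
            rw [ih d [], if_pos rfl, pvSegs_header _ hh]; simp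
          · simp only [ne_eq, hc, not_false_eq_true, if_true, if_neg hc]
            rw [ih _ [], if_pos rfl]
            simp [List.takeWhile_cons, List.dropWhile_cons, hh, pvSegs_header _ hh]
        · have hh' : pvIsHeader (PySem.Str.strip l) = false := by
            simpa using hh
          simp only [hh', Bool.false_eq_true, if_false, if_neg he]
          rw [ih d (c ++ [PySem.Str.strip l])]
          have hne : c ++ [PySem.Str.strip l] ≠ [] := by simp
          rw [if_neg hne]
          by_cases hc : c = []
          · subst hc
            rw [if_pos rfl, pvSegs_cons _ hh']
            simp [List.takeWhile_cons, hh']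
          · rw [if_neg hc]
            simp [List.takeWhile_cons, List.dropWhile_cons, hh', List.append_assoc]

-- ===== VERDICT (by name: the statement is the Claim_ definition above) =====
theorem clean_script_lines_spec : Claim_equal_clean_script_lines := by
  intro lines _
  unfold Spec_clean_script_lines clean_script_lines clean_script_lines_alt
  rw [cleanGoA_eq lines [] [], if_pos rfl]
  simp
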